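-- pv_equiv track=rewrite | github.com/jemaromaster/WAPM | Informe/informeHistorialItems.py | comaPorPunto
-- ===== SOURCE A (Python) =====
-- def comaPorPunto(string):
--     r=''
--     for i in string:
--         if i==',':
--             r=r+'.'
--         elif i=='.':
--             r=r+','
--         else:
--             r=r+i
--
--     return r
-- ===== SOURCE B (Python) =====
-- def comaPorPunto(string):
--     # Staged swap via a placeholder: park commas on a sentinel, turn periods
--     # into commas, then turn the sentinel into periods.
--     return string.replace(',', '\x00').replace('.', ',').replace('\x00', '.')
-- ===== Notes on version B (the rewrite author's own statement) =====
-- stated objective: idiomatic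
-- what changed: Replaces the explicit per-character loop with if/elif branches and string-concatenation accumulator by three staged whole-string replace passes using a NUL sentinel (the classic swap-two-substrings idiom).
import Mathlib
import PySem

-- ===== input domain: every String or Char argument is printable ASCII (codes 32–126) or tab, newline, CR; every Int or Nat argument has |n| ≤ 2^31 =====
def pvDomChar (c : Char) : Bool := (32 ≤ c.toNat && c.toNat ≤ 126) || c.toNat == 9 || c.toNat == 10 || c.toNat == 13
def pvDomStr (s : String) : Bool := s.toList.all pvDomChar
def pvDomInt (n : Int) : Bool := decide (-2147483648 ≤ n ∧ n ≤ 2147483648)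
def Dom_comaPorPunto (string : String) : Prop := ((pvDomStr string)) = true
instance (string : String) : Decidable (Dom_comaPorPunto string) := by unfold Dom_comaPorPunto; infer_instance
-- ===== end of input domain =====

-- B swaps ',' and '.' by three staged whole-string replace passes through a NUL
-- sentinel instead of A's per-character branching loop (idiomatic). Equality is
-- claimed on Dom (printable ASCII + tab/newline/CR), which never contains NUL.

-- ===== PORT A =====
-- literal transliteration: accumulator r, one branch per character
def comaPorPunto (string : String) : String :=
  String.ofList (string.toList.foldl
    (fun r i =>
      if i = ',' then r ++ ['.']
      else if i = '.' then r ++ [',']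
      else r ++ [i]) [])

-- ===== PORT B =====
-- string.replace(',', '\x00').replace('.', ',').replace('\x00', '.')
def comaPorPunto_alt (string : String) : String :=
  PySem.Str.replace (PySem.Str.replace (PySem.Str.replace string "," "\x00") "." ",") "\x00" "."

-- ===== PRECONDITION & SPEC =====
def Spec_comaPorPunto (string : String) (out : String) : Prop := out = comaPorPunto_alt string
instance (string : String) (out : String) : Decidable (Spec_comaPorPunto string out) := by unfold Spec_comaPorPunto; infer_instance

-- ===== CLAIM (what is proved, stated in full; the proofs are below) =====
def Claim_equal_comaPorPunto : Prop := ∀ (string : String), Dom_comaPorPunto string → Spec_comaPorPunto string (comaPorPunto string)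

-- ===== LEMMAS AND PROOFS =====
-- ===== VERDICT (by name: the statement is the Claim_ definition above) =====
-- replace with a single-character pattern is a character map
theorem pv_replace_go_single (o n : Char) (s : List Char) :
    ∀ (fuel : Nat) (acc : List Char), s.length ≤ fuel →
    PySem.Chars.replace.go [o] [n] fuel s acc
      = acc.reverse ++ s.map (fun c => if c = o then n else c) := by
  induction s with
  | nil =>
      intro fuel acc _
      cases fuel <;> simp [PySem.Chars.replace.go]
  | cons c t ih =>
      intro fuel acc hlen
      cases fuel with
      | zero => simp at hlen
      | succ m =>
        have hm : t.length ≤ m := by simpa using hlen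
        by_cases hc : c = o
        · subst hc
          simp [PySem.Chars.replace.go, List.isPrefixOf, ih m _ hm]
        · simp [PySem.Chars.replace.go, List.isPrefixOf, hc, Ne.symm hc, ih m _ hm]

theorem pv_replace_single (o n : Char) (s : List Char) :
    PySem.Chars.replace s [o] [n] = s.map (fun c => if c = o then n else c) := by
  simpa using pv_replace_go_single o n s s.length [] le_rfl

theorem pv_foldl_eq_map (l acc : List Char) :
    l.foldl (fun r i =>
      if i = ',' then r ++ ['.']
      else if i = '.' then r ++ [',']
      else r ++ [i]) acc
    = acc ++ l.map (fun c => if c = ',' then '.' else if c = '.' then ',' else c) := by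
  induction l generalizing acc with
  | nil => simp
  | cons c t ih =>
      simp only [List.foldl_cons, List.map_cons, ih]
      by_cases h1 : c = ','
      · subst h1; simp
      · by_cases h2 : c = '.'
        · subst h2; simp
        · simp [h1, h2]

-- ===== VERDICT (by name: the statement is the Claim_ definition above) =====
theorem comaPorPunto_spec : Claim_equal_comaPorPunto := by
  intro s hdom
  unfold Spec_comaPorPunto comaPorPunto comaPorPunto_alt
  rw [pv_foldl_eq_map]
  apply String.ext
  have e1 : (",".toList) = [','] := rfl
  have e2 : (".".toList) = ['.'] := rfl
  have e3 : ("\x00".toList) = ['\x00'] := rfl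
  simp only [PySem.Str.toList_replace, String.toList_ofList, List.nil_append,
    e1, e2, e3, pv_replace_single, List.map_map]
  apply List.map_congr_left
  intro c hc
  have hdc : pvDomChar c = true := by
    have := (List.all_eq_true.mp (by simpa [pvDomStr, Dom_comaPorPunto] using hdom)) c hc
    simpa using this
  have hnul : c ≠ '\x00' := by
    intro h; subst h; simp [pvDomChar] at hdc
  simp only [Function.comp]
  by_cases h1 : c = ','
  · subst h1; simp
  · by_cases h2 : c = '.'
    · subst h2; simp
    · simp [h1, h2, hnul]
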